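-- pv_equiv track=rewrite | github.com/AngCamp/CampbellMurphy2024 | Figures_and_Technical_Validation/Sharp_wave_component_validation/find_best_global_events_workflow.py | contiguity_score
-- ===== SOURCE A (Python) =====
-- def contiguity_score(mask):
--     # mask: list of bools
--     max_block = 0
--     current = 0
--     for val in mask:
--         if val:
--             current += 1
--             max_block = max(max_block, current)
--         else:
--             current = 0
--     return max_block
-- ===== SOURCE B (Python) =====
-- def contiguity_score(mask):
--     # Segment the mask into maximal runs of equal truthiness, collect the
--     # lengths of the True runs, then take the maximum (0 if none).
--     runs = []
--     i, n = 0, len(mask)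
--     while i < n:
--         j = i
--         while j < n and bool(mask[j]) == bool(mask[i]):
--             j += 1
--         if mask[i]:
--             runs.append(j - i)
--         i = j
--     return max(runs, default=0)
-- ===== Notes on version B (the rewrite author's own statement) =====
-- stated objective: alternative
-- what changed: B first segments the mask into maximal runs of equal value and then takes the maximum length over the True runs, instead of threading a running counter and running maximum through a single loop.
import Mathlib
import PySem

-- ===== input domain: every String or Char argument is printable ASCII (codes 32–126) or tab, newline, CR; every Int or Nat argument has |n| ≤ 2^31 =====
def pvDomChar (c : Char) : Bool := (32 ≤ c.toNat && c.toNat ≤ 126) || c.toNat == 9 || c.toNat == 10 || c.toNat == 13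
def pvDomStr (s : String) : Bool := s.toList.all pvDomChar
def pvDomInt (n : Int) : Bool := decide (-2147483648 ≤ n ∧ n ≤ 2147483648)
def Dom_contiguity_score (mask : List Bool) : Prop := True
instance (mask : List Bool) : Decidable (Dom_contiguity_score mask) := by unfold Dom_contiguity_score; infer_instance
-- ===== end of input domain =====

-- B segments the mask into maximal equal runs and maximizes over the True-run
-- lengths, instead of A's single pass with a running counter and running max.

-- ===== PORT A =====
-- one loop carrying (max_block, current)
def contiguity_score (mask : List Bool) : Int :=
  (mask.foldl
    (fun (s : Int × Int) val =>
      if val then (max s.1 (s.2 + 1), s.2 + 1) else (s.1, 0))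
    (0, 0)).1

-- ===== PORT B =====
-- the run starting at the head: its length is 1 + (takeWhile (= head)),
-- and the remainder is dropWhile (= head) — B's inner while loop.
def csRuns : List Bool → List Int
  | [] => []
  | b :: t =>
      let len : Int := 1 + (t.takeWhile (fun x => x == b)).length
      let rest := t.dropWhile (fun x => x == b)
      if b then len :: csRuns rest else csRuns rest
termination_by mask => mask.length
decreasing_by
  all_goals simp only [List.length_cons]
  all_goals exact Nat.lt_succ_of_le (List.length_dropWhile_le _ _)

-- max(runs, default=0); exact here since every run length is ≥ 1
def contiguity_score_alt (mask : List Bool) : Int :=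
  (csRuns mask).foldl (fun acc r => max acc r) 0

-- ===== PRECONDITION & SPEC =====
def Spec_contiguity_score (mask : List Bool) (out : Int) : Prop := out = contiguity_score_alt mask
instance (mask : List Bool) (out : Int) : Decidable (Spec_contiguity_score mask out) := by unfold Spec_contiguity_score; infer_instance

-- ===== CLAIM (what is proved, stated in full; the proofs are below) =====
def Claim_equal_contiguity_score : Prop := ∀ (mask : List Bool), Dom_contiguity_score mask → Spec_contiguity_score mask (contiguity_score mask)

-- ===== LEMMAS AND PROOFS =====

-- reference function: best mask c = final max given current run length c,
-- assuming the max seen so far is already accounted for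
def csBest : List Bool → Int → Int
  | [], c => c
  | true :: t, c => csBest t (c + 1)
  | false :: t, c => max c (csBest t 0)

theorem csBest_ge : ∀ (t : List Bool) (c : Int), c ≤ csBest t c := by
  intro t
  induction t with
  | nil => intro c; simp [csBest]
  | cons b t ih =>
      intro c
      cases b with
      | true => exact le_trans (by omega) (ih (c + 1))
      | false => simp [csBest]

-- A's fold equals max m (csBest mask c) under the loop invariant 0 ≤ c ≤ m
theorem csFold_eq : ∀ (mask : List Bool) (m c : Int), 0 ≤ c → c ≤ m →
    (mask.foldl
      (fun (s : Int × Int) val =>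
        if val then (max s.1 (s.2 + 1), s.2 + 1) else (s.1, 0))
      (m, c)).1 = max m (csBest mask c) := by
  intro mask
  induction mask with
  | nil => intro m c h0 hm; simp [csBest]; omega
  | cons b t ih =>
      intro m c h0 hm
      cases b with
      | true =>
          simp only [List.foldl_cons, csBest]
          rw [if_pos trivial, ih (max m (c + 1)) (c + 1) (by omega) (by omega)]
          have := csBest_ge t (c + 1)
          omega
      | false =>
          simp only [List.foldl_cons, csBest]
          rw [if_neg (by simp : ¬(false = true)), ih m 0 le_rfl (by omega)]
          have := csBest_ge t (0 : Int)
          omega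

-- moving a nonnegative init out of a foldl max over nonnegative elements
theorem foldl_max_init : ∀ (l : List Int) (i : Int), 0 ≤ i → (∀ x ∈ l, 0 ≤ x) →
    l.foldl (fun acc r => max acc r) i = max i (l.foldl (fun acc r => max acc r) 0) := by
  intro l
  induction l with
  | nil => intro i hi _; simp; omega
  | cons a t ih =>
      intro i hi hl
      have ha : 0 ≤ a := hl a (List.mem_cons_self)
      have ht : ∀ x ∈ t, 0 ≤ x := fun x hx => hl x (List.mem_cons_of_mem _ hx)
      simp only [List.foldl_cons]
      rw [ih (max i a) (by omega) ht, ih (max 0 a) (by omega) ht]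
      omega

theorem csRuns_pos : ∀ (mask : List Bool), ∀ x ∈ csRuns mask, 0 ≤ x := by
  intro mask
  induction mask using csRuns.induct with
  | case1 => intro x hx; rw [csRuns] at hx; exact absurd hx (List.not_mem_nil)
  | case2 t rest ih =>
      intro x hx
      rw [csRuns, if_pos rfl] at hx
      rcases List.mem_cons.mp hx with h | h
      · subst h; positivity
      · exact ih x h
  | case3 b t rest hb ih =>
      intro x hx
      rw [csRuns, if_neg hb] at hx
      exact ih x hx

-- csBest after dropping a leading block of falses
theorem csBest_dropFalse : ∀ (t : List Bool),
    csBest (t.dropWhile (fun x => x == false)) 0 = csBest t 0 := by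
  intro t
  induction t with
  | nil => rfl
  | cons b t ih =>
      cases b with
      | true => simp [List.dropWhile]
      | false =>
          simp only [List.dropWhile, beq_self_eq_true]
          rw [ih]
          have := csBest_ge t (0 : Int)
          simp [csBest]; omega

-- csBest splits off the leading block of trues
theorem csBest_splitTrue : ∀ (t : List Bool) (c : Int), 0 ≤ c →
    csBest t c = max (c + ((t.takeWhile (fun x => x == true)).length : Int))
      (csBest (t.dropWhile (fun x => x == true)) 0) := by
  intro t
  induction t with
  | nil => intro c hc; simp [csBest]; omega
  | cons b t ih =>
      intro c hc
      cases b with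
      | true =>
          simp only [List.takeWhile, List.dropWhile, beq_self_eq_true, csBest,
            List.length_cons]
          rw [ih (c + 1) (by omega)]
          push_cast
          omega
      | false =>
          simp only [List.takeWhile, List.dropWhile, csBest]
          have h := csBest_ge t (0 : Int)
          simp [csBest]
          omega

-- B computes csBest mask 0
theorem csRuns_max : ∀ (mask : List Bool),
    (csRuns mask).foldl (fun acc r => max acc r) 0 = csBest mask 0 := by
  intro mask
  induction mask using csRuns.induct with
  | case1 => rw [csRuns]; rfl
  | case2 t rest ih =>
      rw [show rest = t.dropWhile (fun x => x == true) from rfl] at ih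
      rw [csRuns, if_pos rfl]
      simp only [List.foldl_cons]
      rw [foldl_max_init _ _ (by positivity) (csRuns_pos _)]
      rw [ih]
      show max 0 (1 + ((t.takeWhile (fun x => x == true)).length : Int)) ⊔ _ = _
      rw [show csBest (true :: t) 0 = csBest t 1 from rfl]
      rw [csBest_splitTrue t 1 (by omega)]
      have : (0 : Int) ≤ ((t.takeWhile (fun x => x == true)).length : Int) := by positivity
      omega
  | case3 b t rest hb ih =>
      have hb' : b = false := by simpa using hb
      rw [show rest = t.dropWhile (fun x => x == b) from rfl] at ih
      subst hb'
      rw [csRuns, if_neg (by simp)]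
      rw [ih]
      rw [show csBest (false :: t) 0 = max 0 (csBest t 0) from rfl]
      rw [csBest_dropFalse]
      have := csBest_ge t (0 : Int)
      omega

-- ===== VERDICT (by name: the statement is the Claim_ definition above) =====
theorem contiguity_score_spec : Claim_equal_contiguity_score := by
  intro mask _
  show contiguity_score mask = contiguity_score_alt mask
  unfold contiguity_score contiguity_score_alt
  rw [csFold_eq mask 0 0 le_rfl le_rfl, csRuns_max]
  have := csBest_ge mask (0 : Int)
  omega
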